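-- pv_equiv track=rewrite | github.com/DilnukDeSilva/sgs-audit-project | backend/routes/ai.py | _compact_operational_uses
-- ===== SOURCE A (Python) =====
-- from collections import Counter
--
-- def _compact_operational_uses(unique_uses: list, all_uses: list) -> list:
--     """
--     Reduce prompt size to avoid Groq free-tier TPM/token limit errors.
--     Keeps most frequent items with counts and bounds final payload length.
--     """
--     # Frequency over all raw rows (not unique) gives model weighting signal.
--     freq = Counter([u.strip() for u in all_uses if u and u.strip()])
--
--     # Keep most common entries first; include count in each line.
--     ranked = [f"{text} [count={count}]" for text, count in freq.most_common(140)]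
--
--     # Hard cap by characters to stay well under request token limits.
--     max_chars = 9000
--     output = []
--     running = 0
--     for item in ranked:
--         add_len = len(item) + 1
--         if running + add_len > max_chars:
--             break
--         output.append(item)
--         running += add_len
--
--     # Fallback: at least a small sample if everything was too long.
--     if not output:
--         output = unique_uses[:40]
--     return output
-- ===== SOURCE B (Python) =====
-- from collections import Counter
-- from bisect import bisect_right
--
-- def _compact_operational_uses(unique_uses: list, all_uses: list) -> list:
--     # Same ranking as before: frequency over raw rows, most common first.
--     freq = Counter([u.strip() for u in all_uses if u and u.strip()])
--     ranked = [f"{text} [count={count}]" for text, count in freq.most_common(140)]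
--
--     # Char cap via a prefix-sum table + binary search instead of a running loop:
--     # prefix[i] = total chars (incl. newline each) of ranked[:i+1]; the output is
--     # the longest prefix whose total stays <= max_chars.
--     max_chars = 9000
--     prefix = []
--     total = 0
--     for item in ranked:
--         total += len(item) + 1
--         prefix.append(total)
--     cut = bisect_right(prefix, max_chars)
--     output = ranked[:cut]
--
--     # Fallback: at least a small sample if everything was too long.
--     if not output:
--         output = unique_uses[:40]
--     return output
-- ===== Notes on version B (the rewrite author's own statement) =====
-- stated objective: alternative
-- what changed: The sequential running-total cap loop with break is replaced by building a prefix-sum table of cumulative line lengths and locating the cut point with bisect_right, then slicing ranked[:cut]; the Counter/most_common ranking and the empty-output fallback are unchanged.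
import Mathlib
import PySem

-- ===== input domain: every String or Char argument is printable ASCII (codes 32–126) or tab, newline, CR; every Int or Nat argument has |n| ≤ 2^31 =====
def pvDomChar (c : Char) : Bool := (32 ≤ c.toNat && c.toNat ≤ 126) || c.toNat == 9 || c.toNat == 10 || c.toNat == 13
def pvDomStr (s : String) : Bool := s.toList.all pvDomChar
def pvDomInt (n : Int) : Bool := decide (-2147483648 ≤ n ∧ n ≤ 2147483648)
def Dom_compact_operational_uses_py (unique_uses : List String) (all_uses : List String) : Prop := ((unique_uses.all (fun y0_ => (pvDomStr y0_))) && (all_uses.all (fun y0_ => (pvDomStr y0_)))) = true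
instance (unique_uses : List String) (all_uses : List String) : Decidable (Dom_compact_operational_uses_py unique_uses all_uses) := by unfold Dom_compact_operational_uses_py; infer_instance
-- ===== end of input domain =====

-- B replaces A's running-total cap loop (with break) by a prefix-sum table plus a
-- bisect_right binary search for the cut point; same ranking, same fallback (alternative decomposition, not claimed faster).

-- ===== PORT A =====
-- shared first lines of both Pythons: freq = Counter(stripped non-empty rows),
-- ranked = formatted lines of freq.most_common(140)
def pvRanked (all_uses : List String) : List String :=
  let freq := PySem.Dict.counter
    ((all_uses.filter (fun u => decide (u ≠ "") && decide (PySem.Str.strip u ≠ ""))).map PySem.Str.strip)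
  ((PySem.List.sorted freq.items (fun p => p.2) true).take 140).map
    (fun p => p.1 ++ " [count=" ++ PySem.Int.toStr p.2 ++ "]")

-- A's cap loop: for item in ranked: if running+len(item)+1 > 9000: break; append
def pvCapLoop : List String → Int → List String
  | [], _ => []
  | item :: rest, running =>
    let add_len := PySem.Str.len item + 1
    if running + add_len > 9000 then []
    else item :: pvCapLoop rest (running + add_len)

def compact_operational_uses_py (unique_uses : List String) (all_uses : List String) : List String :=
  let ranked := pvRanked all_uses
  let output := pvCapLoop ranked 0
  if output = [] then PySem.List.slice unique_uses none (some 40) else output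

-- ===== PORT B =====
-- B's prefix table: prefix[i] = cumulative length (len(item)+1 each) of ranked[:i+1]
def pvPrefix (ranked : List String) : List Int :=
  (ranked.foldl (fun (st : List Int × Int) item =>
      (st.1 ++ [st.2 + (PySem.Str.len item + 1)], st.2 + (PySem.Str.len item + 1))) ([], 0)).1

def compact_operational_uses_py_alt (unique_uses : List String) (all_uses : List String) : List String :=
  let ranked := pvRanked all_uses
  let cut := PySem.List.bisectRight (pvPrefix ranked) (9000 : Int)
  let output := PySem.List.slice ranked none (some (cut : Int))
  if output = [] then PySem.List.slice unique_uses none (some 40) else output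

-- ===== PRECONDITION & SPEC =====
def Spec_compact_operational_uses_py (unique_uses : List String) (all_uses : List String) (out : List String) : Prop := out = compact_operational_uses_py_alt unique_uses all_uses
instance (unique_uses : List String) (all_uses : List String) (out : List String) : Decidable (Spec_compact_operational_uses_py unique_uses all_uses out) := by unfold Spec_compact_operational_uses_py; infer_instance

-- ===== CLAIM (what is proved, stated in full; the proofs are below) =====
def Claim_equal_compact_operational_uses_py : Prop := ∀ (unique_uses : List String) (all_uses : List String), Dom_compact_operational_uses_py unique_uses all_uses → Spec_compact_operational_uses_py unique_uses all_uses (compact_operational_uses_py unique_uses all_uses)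

-- ===== LEMMAS AND PROOFS =====

-- weight of one line: len(item) + 1
def pvW (s : String) : Int := PySem.Str.len s + 1

lemma pvW_pos (s : String) : 0 < pvW s := by
  have : (0 : Int) ≤ PySem.Str.len s := by
    simp [PySem.Str.len_eq]
  unfold pvW; omega

-- mathematical prefix-sum list starting from a running total t
def pvPre (t : Int) : List String → List Int
  | [] => []
  | x :: xs => (t + pvW x) :: pvPre (t + pvW x) xs

lemma pvPrefix_foldl (r : List String) : ∀ (acc : List Int) (t : Int),
    r.foldl (fun (st : List Int × Int) item =>
      (st.1 ++ [st.2 + (PySem.Str.len item + 1)], st.2 + (PySem.Str.len item + 1))) (acc, t)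
      = (acc ++ pvPre t r, t + (r.map pvW).sum) := by
  induction r with
  | nil => intro acc t; simp [pvPre]
  | cons x xs ih =>
    intro acc t
    simp only [List.foldl_cons, ih, pvPre, pvW, List.map_cons, List.sum_cons]
    refine Prod.ext ?_ ?_
    · simp
    · simp; ring

lemma pvPrefix_eq (r : List String) : pvPrefix r = pvPre 0 r := by
  unfold pvPrefix
  rw [pvPrefix_foldl]
  simp

lemma pvPre_length (r : List String) : ∀ t, (pvPre t r).length = r.length := by
  induction r with
  | nil => intro t; rfl
  | cons x xs ih => intro t; simp [pvPre, ih]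

lemma pvPre_elem_gt (r : List String) : ∀ (t : Int) (j : Nat) (hj : j < (pvPre t r).length),
    t < (pvPre t r)[j] := by
  induction r with
  | nil => intro t j hj; simp [pvPre] at hj
  | cons x xs ih =>
    intro t j hj
    cases j with
    | zero => simpa [pvPre] using (pvW_pos x)
    | succ k =>
      have hk : k < (pvPre (t + pvW x) xs).length := by
        simpa [pvPre] using hj
      have := ih (t + pvW x) k hk
      have hw := pvW_pos x
      simp only [pvPre, List.getElem_cons_succ]
      omega

lemma pvPre_pairwise (r : List String) : ∀ t, (pvPre t r).Pairwise (fun a b => a ≤ b) := by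
  induction r with
  | nil => intro t; simp [pvPre]
  | cons x xs ih =>
    intro t
    simp only [pvPre, List.pairwise_cons]
    refine ⟨?_, ih (t + pvW x)⟩
    intro b hb
    obtain ⟨j, hj, rfl⟩ := List.mem_iff_getElem.mp hb
    exact le_of_lt (pvPre_elem_gt xs (t + pvW x) j hj)

-- A's loop counted: how many items the cap loop keeps
def pvCapN : List String → Int → Nat
  | [], _ => 0
  | x :: xs, t => if t + pvW x > 9000 then 0 else pvCapN xs (t + pvW x) + 1

lemma pvCapLoop_take (r : List String) : ∀ t, pvCapLoop r t = r.take (pvCapN r t) := by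
  induction r with
  | nil => intro t; rfl
  | cons x xs ih =>
    intro t
    simp only [pvCapLoop, pvCapN, pvW]
    split
    · rfl
    · simp [ih]

lemma pvCapN_le (r : List String) : ∀ t, pvCapN r t ≤ r.length := by
  induction r with
  | nil => intro t; simp [pvCapN]
  | cons x xs ih =>
    intro t
    simp only [pvCapN]
    split
    · simp
    · simpa using ih (t + pvW x)

lemma pvCapN_lt_imp (r : List String) : ∀ (t : Int) (j : Nat) (hj : j < (pvPre t r).length),
    j < pvCapN r t → (pvPre t r)[j] ≤ 9000 := by
  induction r with
  | nil => intro t j hj; simp [pvPre] at hj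
  | cons x xs ih =>
    intro t j hj hlt
    by_cases hc : t + pvW x > 9000
    · simp [pvCapN, hc] at hlt
    · cases j with
      | zero => simp only [pvPre, List.getElem_cons_zero]; omega
      | succ k =>
        have hk : k < (pvPre (t + pvW x) xs).length := by simpa [pvPre] using hj
        have hkl : k < pvCapN xs (t + pvW x) := by
          simp only [pvCapN, if_neg hc] at hlt; omega
        simpa [pvPre] using ih (t + pvW x) k hk hkl

lemma pvCapN_ge_imp (r : List String) : ∀ (t : Int) (j : Nat) (hj : j < (pvPre t r).length),
    pvCapN r t ≤ j → 9000 < (pvPre t r)[j] := by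
  induction r with
  | nil => intro t j hj; simp [pvPre] at hj
  | cons x xs ih =>
    intro t j hj hge
    by_cases hc : t + pvW x > 9000
    · cases j with
      | zero => simpa [pvPre] using hc
      | succ k =>
        have hk : k < (pvPre (t + pvW x) xs).length := by simpa [pvPre] using hj
        have := pvPre_elem_gt xs (t + pvW x) k hk
        simp only [pvPre, List.getElem_cons_succ]
        omega
    · cases j with
      | zero => simp [pvCapN, hc] at hge
      | succ k =>
        have hk : k < (pvPre (t + pvW x) xs).length := by simpa [pvPre] using hj
        have hkl : pvCapN xs (t + pvW x) ≤ k := by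
          simp only [pvCapN, if_neg hc] at hge; omega
        simpa [pvPre] using ih (t + pvW x) k hk hkl

-- two numbers sandwiched the same way around a list are equal
lemma pvSandwich_uniq (xs : List Int) (x : Int) (n m : Nat)
    (hn : n ≤ xs.length) (hm : m ≤ xs.length)
    (hn1 : ∀ (j : Nat) (hj : j < xs.length), j < n → xs[j] ≤ x)
    (hn2 : ∀ (j : Nat) (hj : j < xs.length), n ≤ j → x < xs[j])
    (hm1 : ∀ (j : Nat) (hj : j < xs.length), j < m → xs[j] ≤ x)
    (hm2 : ∀ (j : Nat) (hj : j < xs.length), m ≤ j → x < xs[j]) : n = m := by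
  rcases lt_trichotomy n m with h | h | h
  · have hj : n < xs.length := lt_of_lt_of_le h hm
    have := hm1 n hj h
    have := hn2 n hj (le_refl n)
    omega
  · exact h
  · have hj : m < xs.length := lt_of_lt_of_le h hn
    have := hn1 m hj h
    have := hm2 m hj (le_refl m)
    omega

lemma pvBisect_eq_capN (r : List String) :
    PySem.List.bisectRight (pvPre 0 r) (9000 : Int) = pvCapN r 0 := by
  obtain ⟨h1, h2, h3⟩ := PySem.List.bisectRight_spec (pvPre 0 r) 9000 (pvPre_pairwise r 0)
  refine pvSandwich_uniq (pvPre 0 r) 9000 _ _ h1 ?_ h2 h3 ?_ ?_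
  · rw [pvPre_length]; exact pvCapN_le r 0
  · intro j hj hlt; exact pvCapN_lt_imp r 0 j hj hlt
  · intro j hj hge; exact pvCapN_ge_imp r 0 j hj hge

lemma pvCap_main (r : List String) :
    pvCapLoop r 0 =
      PySem.List.slice r none (some ((PySem.List.bisectRight (pvPrefix r) (9000 : Int) : Nat) : Int)) := by
  rw [PySem.List.slice_to_natCast, pvPrefix_eq, pvBisect_eq_capN, pvCapLoop_take]

-- ===== VERDICT (by name: the statement is the Claim_ definition above) =====
theorem compact_operational_uses_py_spec : Claim_equal_compact_operational_uses_py := by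
  intro unique_uses all_uses _
  show compact_operational_uses_py unique_uses all_uses = _
  unfold compact_operational_uses_py compact_operational_uses_py_alt
  simp only [pvCap_main]
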